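-- pv_equiv track=rewrite | github.com/pypi-data/pypi-mirror-25 | packages/padatious/padatious-0.2.1-py2.py3-none-any.whl/padatious/util.py | expand_parentheses
-- ===== SOURCE A (Python) =====
-- def expand_parentheses(sent):
--     """
--     ['1', '(', '2', '|', '3, ')'] -> [['1', '2'], ['1', '3']]
--     For example:
--
--     Will it (rain|pour) (today|tomorrow|)?
--
--     ---->
--
--     Will it rain today?
--     Will it rain tomorrow?
--     Will it rain?
--     Will it pour today?
--     Will it pour tomorrow?
--     Will it pour?
--
--     Args:
--         sent (list<str>): List of tokens in sentence
--     Returns: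
--         list<list<str>>: Multiple possible sentences from original
--     """
--     if '(' not in sent or '|' not in sent:
--         return [sent]
--     else:
--         class State:  # Parentheses state
--             IN = 0
--             OUT = 1
--         state = State.OUT
--         all_pars = {}
--         par_groups = []
--         cur_group = []
--
--         remaining = []
--
--         for token in sent:
--             if state == State.IN:
--                 if token in ')|':
--                     par_groups.append(cur_group)
--                     cur_group = []
--                 else:
--                     cur_group.append(token)
--                 if token == ')':
--                     state = State.OUT
--                     all_pars[len(remaining)] = par_groups
--                     remaining.append('()')
--                     par_groups = []
--             elif state == State.OUT:
--                 if token == '(':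
--                     state = State.IN
--                 else:
--                     remaining.append(token)
--
--         sents = [[]]
--         for i, token in enumerate(remaining):
--             if token == '()':
--                 for j in list(range(len(sents))):
--                     pairs = all_pars[i]
--                     for p in pairs[1:]:
--                         sents.append(sents[j] + p)
--                     sents[j] += pairs[0]
--             else:
--                 for sent in sents:
--                     sent.append(token)
--         return sents
-- ===== SOURCE B (Python) =====
-- def expand_parentheses(sent):
--     if '(' not in sent or '|' not in sent:
--         return [sent]
--     segments, tail = _parse(sent)
--     sents = [[]]
--     for lead, alts in segments:
--         sents = [s + lead + alts[0] for s in sents] + \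
--                 [s + lead + a for s in sents for a in alts[1:]]
--     return [s + tail for s in sents]
--
--
-- def _parse(tokens):
--     """Split tokens into ([(lead, alternatives)...], tail).
--
--     lead = tokens before a '(' group, alternatives = the '|'-separated
--     pieces strictly between that '(' and the next ')'.  An unclosed '('
--     drops the group and everything after it."""
--     if '(' not in tokens:
--         return [], tokens
--     i = tokens.index('(')
--     lead = tokens[:i]
--     try:
--         j = tokens.index(')', i + 1)
--     except ValueError:
--         return [], lead
--     alts, cur = [], []
--     for tok in tokens[i + 1:j]:
--         if tok == '|':
--             alts.append(cur)
--             cur = []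
--         else:
--             cur.append(tok)
--     alts.append(cur)
--     rest_segments, tail = _parse(tokens[j + 1:])
--     return [(lead, alts)] + rest_segments, tail
-- ===== Notes on version B (the rewrite author's own statement) =====
-- stated objective: alternative
-- what changed: A tokenizes with a two-state machine that records groups in a dict keyed by position of a '()' sentinel and then expands by index-mutating the sentence list inside a range(len(sents)) loop; B instead parses recursively with index()/slices into (lead, alternatives) segments and expands them with a single pure fold of list comprehensions.
-- outside the precondition, e.g. on expand_parentheses(['(', '()', '|', 'b', ')']): A returns [['()'], ['b']], B returns [['()'], ['b']]; on expand_parentheses(['()', '(', 'x', '|', 'y', ')']): A raises KeyError, B returns [['()', 'x'], ['()', 'y']]; on expand_parentheses(['(', '', '|', 'b', ')']): A returns [[], [], ['b']], B returns [[''], ['b']]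
import Mathlib
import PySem

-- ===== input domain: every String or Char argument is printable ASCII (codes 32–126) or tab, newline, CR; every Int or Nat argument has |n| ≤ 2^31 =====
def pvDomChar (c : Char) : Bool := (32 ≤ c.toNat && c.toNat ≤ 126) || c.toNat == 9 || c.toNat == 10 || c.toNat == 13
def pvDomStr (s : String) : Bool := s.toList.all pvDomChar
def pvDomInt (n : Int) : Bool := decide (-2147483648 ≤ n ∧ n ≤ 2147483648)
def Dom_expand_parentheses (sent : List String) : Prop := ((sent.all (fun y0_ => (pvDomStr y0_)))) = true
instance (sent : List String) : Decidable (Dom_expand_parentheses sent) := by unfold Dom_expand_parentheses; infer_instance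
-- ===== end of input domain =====

-- B replaces A's sentinel-dict state machine and index-mutating expansion loop with a
-- recursive slice-based parser into (lead, alternatives) segments plus a pure fold (objective: alternative).

-- ===== PORT A =====
-- One step of A's parsing loop; state = (State, all_pars, par_groups, cur_group, remaining),
-- with State.IN = 0, State.OUT = 1 as in the Python class.
def aParseStep
    (st : Int × PySem.Dict Int (List (List String)) × List (List String) × List String × List String)
    (token : String) :
    Int × PySem.Dict Int (List (List String)) × List (List String) × List String × List String :=
  let (state, all_pars, par_groups, cur_group, remaining) := st
  if state = 0 then
    -- `token in ')|'` is Python substring membership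
    let (par_groups, cur_group) :=
      if PySem.Str.isIn token ")|" then (par_groups ++ [cur_group], ([] : List String))
      else (par_groups, cur_group ++ [token])
    if token = ")" then
      (1, all_pars.insert (remaining.length : Int) par_groups, [], cur_group, remaining ++ ["()"])
    else
      (0, all_pars, par_groups, cur_group, remaining)
  else
    if token = "(" then (0, all_pars, par_groups, cur_group, remaining)
    else (state, all_pars, par_groups, cur_group, remaining ++ [token])

-- One step of A's expansion loop over `enumerate(remaining)`; the inner
-- `for j in list(range(len(sents)))` with its appends and the in-place `sents[j] += pairs[0]`
-- is the inner pyRange foldl (appends first, then the setitem, as in the Python).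
def aExpandStep (all_pars : PySem.Dict Int (List (List String)))
    (sents : List (List String)) (it : Int × String) : List (List String) :=
  let (i, token) := it
  if token = "()" then
    -- Python `all_pars[i]` raises KeyError when i is absent and `pairs[0]` when pairs = [];
    -- both are unreachable under Pre_: getD/headD supply defaults that are never used there.
    let pairs := all_pars.getD i []
    (PySem.List.pyRange 0 (sents.length : Int) 1).foldl
      (fun ss j =>
        let sj := PySem.List.pyGetD ss j []
        PySem.List.pySetD (ss ++ (pairs.drop 1).map (fun p => sj ++ p)) j (sj ++ pairs.headD []))
      sents
  else
    sents.map (fun s => s ++ [token])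

def expand_parentheses (sent : List String) : List (List String) :=
  if "(" ∉ sent ∨ "|" ∉ sent then [sent]
  else
    let parsed := sent.foldl aParseStep (1, PySem.Dict.empty, [], [], [])
    let all_pars := parsed.2.1
    let remaining := parsed.2.2.2.2
    (PySem.List.enumerate remaining 0).foldl (aExpandStep all_pars) [[]]

-- ===== PORT B =====
-- Source B's `for tok in tokens[i+1:j]` splitter loop (accumulators alts, cur), then alts.append(cur)
def splitPipeLoop (acc : List (List String) × List String) (tok : String) :
    List (List String) × List String :=
  if tok = "|" then (acc.1 ++ [acc.2], []) else (acc.1, acc.2 ++ [tok])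

def splitPipe (g : List String) : List (List String) :=
  let r := g.foldl splitPipeLoop ([], [])
  r.1 ++ [r.2]

-- Source B's _parse; `tokens.index(')', i + 1)` is an index into `tokens.drop (i + 1)` here
def parseB (tokens : List String) :
    List (List String × List (List String)) × List String :=
  match h : PySem.List.index? tokens "(" with
  | none => ([], tokens)
  | some i =>
    let lead := tokens.take i
    let rest := tokens.drop (i + 1)
    match PySem.List.index? rest ")" with
    | none => ([], lead)
    | some j =>
      let res := parseB (rest.drop (j + 1))
      ((lead, splitPipe (rest.take j)) :: res.1, res.2)
termination_by tokens.length
decreasing_by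
  have hm : "(" ∈ tokens := by
    have hs := PySem.List.index?_isSome_iff (xs := tokens) (v := "(")
    rw [h] at hs; simp at hs; exact hs
  have : tokens.length ≠ 0 := by
    intro hz; rw [List.length_eq_zero_iff] at hz; simp [hz] at hm
  simp only [List.length_drop]
  omega

-- Source B's expansion comprehension over one (lead, alternatives) segment
def bFoldStep (sents : List (List String)) (seg : List String × List (List String)) :
    List (List String) :=
  sents.map (fun s => s ++ seg.1 ++ seg.2.headD []) ++
  sents.flatMap (fun s => (seg.2.drop 1).map (fun a => s ++ seg.1 ++ a))

def expand_parentheses_alt (sent : List String) : List (List String) :=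
  if "(" ∉ sent ∨ "|" ∉ sent then [sent]
  else
    let p := parseB sent
    (p.1.foldl bFoldStep [[]]).map (fun s => s ++ p.2)

-- ===== PRECONDITION & SPEC =====
-- Pre_ excludes sentences that pass the paren guard AND contain one of the literal tokens
-- "", "()" or ")|": these collide with A's internal "()" sentinel (KeyError on a "()" token
-- outside a group) or with its `token in ')|'` string-membership separator test ("" and ")|"
-- are accidentally treated as group separators) — corner tokens no tokenized sentence
-- contains; B splits groups only on "|".
def Pre_expand_parentheses (sent : List String) : Prop :=
  ¬ ("(" ∈ sent ∧ "|" ∈ sent ∧ ("" ∈ sent ∨ "()" ∈ sent ∨ ")|" ∈ sent))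
instance (sent : List String) : Decidable (Pre_expand_parentheses sent) := by
  unfold Pre_expand_parentheses; infer_instance

def pvWitness_expand_parentheses : List String :=
  ["Will", "it", "(", "rain", "|", "pour", ")", "(", "today", "|", "tomorrow", "|", ")"]

def Spec_expand_parentheses (sent : List String) (out : List (List String)) : Prop :=
  out = expand_parentheses_alt sent
instance (sent : List String) (out : List (List String)) : Decidable (Spec_expand_parentheses sent out) := by
  unfold Spec_expand_parentheses; infer_instance

-- ===== CLAIM (what is proved, stated in full; the proofs are below) =====
def Claim_equal_expand_parentheses : Prop :=
  ∀ (sent : List String), Dom_expand_parentheses sent → Pre_expand_parentheses sent →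
    Spec_expand_parentheses sent (expand_parentheses sent)

-- ===== LEMMAS AND PROOFS =====

theorem infix_pair {α : Type} (l : List α) (a b : α) (h : l <:+: [a, b]) :
    l = [] ∨ l = [a] ∨ l = [b] ∨ l = [a, b] := by
  match l with
  | [] => exact Or.inl rfl
  | [c] =>
    have hm : c ∈ [a,b] := by
      have hs := h.sublist
      simpa using hs
    simp at hm
    rcases hm with h1 | h1 <;> simp [h1]
  | [c, d] =>
    have he := List.IsInfix.eq_of_length h (by simp)
    simp at he
    right; right; right; simp [he]
  | c :: d :: e :: l' =>
    have hl := h.length_le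
    simp at hl

theorem isIn_parbar_false (t : String) (h0 : t ≠ "") (hp : t ≠ ")") (hb : t ≠ "|") (h2 : t ≠ ")|") :
    PySem.Str.isIn t ")|" = false := by
  have := PySem.Str.isIn_iff_infix (sub := t) (s := ")|")
  rcases hh : PySem.Str.isIn t ")|" with _|_
  · rfl
  · exfalso
    have hinf := this.mp hh
    rcases infix_pair _ _ _ hinf with h | h | h | h
    · exact h0 (by have h' := congrArg String.ofList h; rwa [String.ofList_toList] at h')
    · exact hp (by have h' := congrArg String.ofList h; rwa [String.ofList_toList] at h')
    · exact hb (by have h' := congrArg String.ofList h; rwa [String.ofList_toList] at h')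
    · exact h2 (by have h' := congrArg String.ofList h; rwa [String.ofList_toList] at h')

theorem aParse_out_run (ts : List String) (d : PySem.Dict Int (List (List String)))
    (pg : List (List String)) (cg : List String) (R : List String) (h : "(" ∉ ts) :
    ts.foldl aParseStep (1, d, pg, cg, R) = (1, d, pg, cg, R ++ ts) := by
  induction ts generalizing R with
  | nil => simp
  | cons t ts ih =>
    simp at h
    rw [List.foldl_cons]
    have hstep : aParseStep (1, d, pg, cg, R) t = (1, d, pg, cg, R ++ [t]) := by
      have hne : t ≠ "(" := Ne.symm h.1
      simp [aParseStep, hne]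
    rw [hstep, ih _ h.2]
    simp

theorem aParse_in_run (g : List String) (d : PySem.Dict Int (List (List String)))
    (pg : List (List String)) (cg : List String) (R : List String)
    (hp : ")" ∉ g) (h0 : "" ∉ g) (h2 : ")|" ∉ g) :
    g.foldl aParseStep (0, d, pg, cg, R) =
      (0, d, (g.foldl splitPipeLoop (pg, cg)).1, (g.foldl splitPipeLoop (pg, cg)).2, R) := by
  induction g generalizing pg cg with
  | nil => simp
  | cons t g ih =>
    simp at hp h0 h2
    rw [List.foldl_cons, List.foldl_cons]
    by_cases hb : t = "|"
    · have hstep : aParseStep (0, d, pg, cg, R) t = (0, d, pg ++ [cg], [], R) := by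
        have hbar : PySem.Chars.isIn ['|'] [')', '|'] = true := by decide
        simp [aParseStep, hb, hbar]
      rw [hstep, ih _ _ hp.2 h0.2 h2.2, splitPipeLoop, if_pos hb]
    · have hfalse := isIn_parbar_false t h0.1 (Ne.symm hp.1) hb (Ne.symm h2.1)
      have hstep : aParseStep (0, d, pg, cg, R) t = (0, d, pg, cg ++ [t], R) := by
        have hno : t ≠ ")" := Ne.symm hp.1
        simp only [PySem.Str.isIn_eq, show (")|" : String).toList = [')', '|'] from rfl] at hfalse
        simp [aParseStep, hfalse, hno]
      rw [hstep, ih _ _ hp.2 h0.2 h2.2, splitPipeLoop, if_neg hb]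

def render (segs : List (List String × List (List String))) (tl : List String) : List String :=
  segs.flatMap (fun p => p.1 ++ ["()"]) ++ tl

def extendD (d : PySem.Dict Int (List (List String))) (base : Int) :
    List (List String × List (List String)) → PySem.Dict Int (List (List String))
  | [] => d
  | (l, a) :: segs => extendD (d.insert (base + l.length) a) (base + l.length + 1) segs

theorem parseB_none (tokens : List String) (h : PySem.List.index? tokens "(" = none) :
    parseB tokens = ([], tokens) := by
  rw [parseB]
  split
  · rfl
  · rename_i i hi; rw [h] at hi; cases hi

theorem parseB_unclosed (tokens : List String) (i : Nat)
    (h : PySem.List.index? tokens "(" = some i)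
    (h2 : PySem.List.index? (tokens.drop (i+1)) ")" = none) :
    parseB tokens = ([], tokens.take i) := by
  rw [parseB]
  split
  · rename_i hi; rw [h] at hi; cases hi
  · rename_i i' hi
    rw [h] at hi; cases hi
    simp only [h2]

theorem parseB_closed (tokens : List String) (i j : Nat)
    (h : PySem.List.index? tokens "(" = some i)
    (h2 : PySem.List.index? (tokens.drop (i+1)) ")" = some j) :
    parseB tokens =
      ((tokens.take i, splitPipe ((tokens.drop (i+1)).take j)) ::
        (parseB ((tokens.drop (i+1)).drop (j+1))).1,
        (parseB ((tokens.drop (i+1)).drop (j+1))).2) := by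
  rw [parseB]
  split
  · rename_i hi; rw [h] at hi; cases hi
  · rename_i i' hi
    rw [h] at hi; cases hi
    simp only [h2]

theorem parse_main (tokens : List String) (d : PySem.Dict Int (List (List String)))
    (R : List String) (h0 : "" ∉ tokens) (h2 : ")|" ∉ tokens) :
    ∃ st pg cg, tokens.foldl aParseStep (1, d, [], [], R) =
      (st, extendD d (R.length : Int) (parseB tokens).1, pg, cg,
        R ++ render (parseB tokens).1 (parseB tokens).2) := by
  induction tokens using parseB.induct generalizing d R with
  | case1 tokens hnone =>
    -- no '(' in tokens
    have hno : "(" ∉ tokens := by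
      rw [← PySem.List.index?_eq_none_iff (xs := tokens) (v := "(")]
      exact hnone
    rw [aParse_out_run _ _ _ _ _ hno]
    rw [parseB_none _ hnone]
    simp [render, extendD]
  | case2 tokens i hsome rest hrest =>
    obtain ⟨pre, suf, htk, hlen, hnp⟩ := (PySem.List.index?_eq_some_iff (xs := tokens) (v := "(") i).mp hsome
    have htake : tokens.take i = pre := by rw [htk, ← hlen]; exact List.take_left
    have hdrop : tokens.drop (i+1) = suf := by rw [htk, ← hlen]; simp [List.drop_append]
    have hnc : ")" ∉ suf := by
      rw [← PySem.List.index?_eq_none_iff (xs := suf) (v := ")")]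
      rw [← hdrop]; exact hrest
    have h0s : "" ∉ suf := fun hm => h0 (htk ▸ (List.mem_append.mpr (Or.inr (List.mem_cons_of_mem _ hm))))
    have h2s : ")|" ∉ suf := fun hm => h2 (htk ▸ (List.mem_append.mpr (Or.inr (List.mem_cons_of_mem _ hm))))
    have hnppre : "(" ∉ pre := hnp
    rw [parseB_unclosed _ _ hsome hrest, htake]
    rw [htk, List.foldl_append, aParse_out_run _ _ _ _ _ hnppre, List.foldl_cons]
    have hpar : aParseStep (1, d, [], [], R ++ pre) "(" = (0, d, [], [], R ++ pre) := by
      simp [aParseStep]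
    rw [hpar, aParse_in_run _ _ _ _ _ hnc h0s h2s]
    exact ⟨0, (suf.foldl splitPipeLoop ([], [])).1, (suf.foldl splitPipeLoop ([], [])).2,
      by simp [render, extendD]⟩
  | case3 tokens i hsome rest j hjsome ih =>
    obtain ⟨pre, suf, htk, hlen, hnp⟩ := (PySem.List.index?_eq_some_iff (xs := tokens) (v := "(") i).mp hsome
    have hdrop : tokens.drop (i+1) = suf := by rw [htk, ← hlen]; simp [List.drop_append]
    have htake : tokens.take i = pre := by rw [htk, ← hlen]; exact List.take_left
    have hjsome' : PySem.List.index? suf ")" = some j := by rw [← hdrop]; exact hjsome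
    obtain ⟨g, suf2, hsuf, hglen, hng⟩ := (PySem.List.index?_eq_some_iff (xs := suf) (v := ")") j).mp hjsome' 
    have hgtake : suf.take j = g := by rw [hsuf, ← hglen]; exact List.take_left
    have hgdrop : suf.drop (j+1) = suf2 := by rw [hsuf, ← hglen]; simp [List.drop_append]
    have hmemsuf : ∀ x : String, x ∈ suf → x ∈ tokens := fun x hx =>
      htk ▸ (List.mem_append.mpr (Or.inr (List.mem_cons_of_mem _ hx)))
    have hmemg : ∀ x : String, x ∈ g → x ∈ tokens := fun x hx =>
      hmemsuf x (hsuf ▸ List.mem_append.mpr (Or.inl hx))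
    have hmemsuf2 : ∀ x : String, x ∈ suf2 → x ∈ tokens := fun x hx =>
      hmemsuf x (hsuf ▸ List.mem_append.mpr (Or.inr (List.mem_cons_of_mem _ hx)))
    rw [parseB_closed _ _ _ hsome (by rw [hdrop]; exact hjsome'), htake, hdrop, hgtake, hgdrop]
    rw [htk, hsuf, List.foldl_append, aParse_out_run _ _ _ _ _ hnp, List.foldl_cons]
    have hpar : aParseStep (1, d, [], [], R ++ pre) "(" = (0, d, [], [], R ++ pre) := by
      simp [aParseStep]
    rw [hpar, List.foldl_append, aParse_in_run _ _ _ _ _ hng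
      (fun hm => h0 (hmemg _ hm)) (fun hm => h2 (hmemg _ hm)), List.foldl_cons]
    have hclose : aParseStep
        (0, d, (g.foldl splitPipeLoop ([], [])).1, (g.foldl splitPipeLoop ([], [])).2, R ++ pre) ")" =
        (1, d.insert ((R ++ pre).length : Int) (splitPipe g), [], [], (R ++ pre) ++ ["()"]) := by
      have hrp : PySem.Chars.isIn [')'] [')', '|'] = true := by decide
      simp [aParseStep, hrp, splitPipe]
    rw [hclose]
    have hsub : (List.drop (i + 1) tokens).drop (j+1) = suf2 := by rw [hdrop, hgdrop]
    rw [hsub] at ih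
    obtain ⟨st, pg, cg, hrec⟩ := ih (d.insert ((R ++ pre).length : Int) (splitPipe g))
      ((R ++ pre) ++ ["()"]) (fun hm => h0 (hmemsuf2 _ hm)) (fun hm => h2 (hmemsuf2 _ hm))
    refine ⟨st, pg, cg, ?_⟩
    rw [hrec]
    have hD : extendD d (R.length : Int) ((pre, splitPipe g) :: (parseB suf2).1) =
        extendD (d.insert (((R ++ pre).length : Nat) : Int) (splitPipe g))
          ((((R ++ pre) ++ ["()"]).length : Nat) : Int) (parseB suf2).1 := by
      simp only [extendD]
      congr 2 <;> · simp; try omega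
    have hR : R ++ render ((pre, splitPipe g) :: (parseB suf2).1) (parseB suf2).2 =
        ((R ++ pre) ++ ["()"]) ++ render (parseB suf2).1 (parseB suf2).2 := by
      simp [render]
    rw [hD, hR]


def DictOK (D : PySem.Dict Int (List (List String))) (base : Int) :
    List (List String × List (List String)) → Prop
  | [] => True
  | (l, a) :: segs => D.getD (base + l.length) [] = a ∧ DictOK D (base + l.length + 1) segs

theorem getD_extendD_lt (segs : List (List String × List (List String)))
    (d : PySem.Dict Int (List (List String))) (base k : Int) (hk : k < base) :
    (extendD d base segs).getD k [] = d.getD k [] := by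
  induction segs generalizing d base with
  | nil => rfl
  | cons seg segs ih =>
    obtain ⟨l, a⟩ := seg
    rw [extendD, ih _ _ (by omega)]
    rw [PySem.Dict.getD_insert]
    rw [if_neg (by omega)]

theorem DictOK_extendD (segs : List (List String × List (List String)))
    (d : PySem.Dict Int (List (List String))) (base : Int) :
    DictOK (extendD d base segs) base segs := by
  induction segs generalizing d base with
  | nil => trivial
  | cons seg segs ih =>
    obtain ⟨l, a⟩ := seg
    refine ⟨?_, ih _ _⟩
    rw [extendD, getD_extendD_lt _ _ _ _ (by omega), PySem.Dict.getD_insert_self]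

theorem tokensRun (D : PySem.Dict Int (List (List String))) (l : List String)
    (S : List (List String)) (base : Int) (h : "()" ∉ l) :
    (PySem.List.enumerate l base).foldl (aExpandStep D) S = S.map (· ++ l) := by
  induction l generalizing S base with
  | nil => simp
  | cons t l ih =>
    simp at h
    rw [PySem.List.enumerate_cons, List.foldl_cons]
    have hstep : aExpandStep D S (base, t) = S.map (· ++ [t]) := by
      simp [aExpandStep, Ne.symm h.1]
    rw [hstep, ih _ _ h.2]
    simp [Function.comp]

theorem markerFold (pairs : List (List String)) (Rm C E : List (List String)) :
    (PySem.List.pyRange (C.length : Int) ((C.length : Int) + (Rm.length : Int)) 1).foldl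
      (fun ss j =>
        let sj := PySem.List.pyGetD ss j []
        PySem.List.pySetD (ss ++ (pairs.drop 1).map (fun p => sj ++ p)) j (sj ++ pairs.headD []))
      (C ++ Rm ++ E) =
    C ++ Rm.map (· ++ pairs.headD []) ++ (E ++ Rm.flatMap (fun s => (pairs.drop 1).map (s ++ ·))) := by
  induction Rm generalizing C E with
  | nil => simp [PySem.List.pyRange_one_eq_nil]
  | cons r Rm ih =>
    rw [PySem.List.pyRange_one_cons (by push_cast [List.length_cons]; omega), List.foldl_cons]
    have hget : PySem.List.pyGetD ((C ++ r :: Rm ++ E)) (C.length : Int) [] = r := by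
      rw [PySem.List.pyGetD_natCast]
      simp
    have hset : PySem.List.pySetD ((C ++ r :: Rm ++ E) ++ (pairs.drop 1).map (fun p => r ++ p))
        (C.length : Int) (r ++ pairs.headD []) =
        (C ++ [r ++ pairs.headD []]) ++ Rm ++ (E ++ (pairs.drop 1).map (fun p => r ++ p)) := by
      rw [PySem.List.pySetD_natCast]
      rw [show C ++ r :: Rm ++ E ++ ((pairs.drop 1).map (fun p => r ++ p)) =
        C ++ r :: (Rm ++ (E ++ (pairs.drop 1).map (fun p => r ++ p))) from by simp]
      rw [List.set_append_right _ _ (le_refl _)]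
      simp
    simp only [hget, hset]
    have harith : (C.length : Int) + 1 = ((C ++ [r ++ pairs.headD []]).length : Int) := by
      simp
    have harith2 : (C.length : Int) + ((r :: Rm).length : Int) =
        ((C ++ [r ++ pairs.headD []]).length : Int) + (Rm.length : Int) := by
      simp; omega
    rw [harith, harith2, ih]
    simp

theorem markerFold0 (pairs : List (List String)) (S : List (List String)) :
    (PySem.List.pyRange 0 (S.length : Int) 1).foldl
      (fun ss j =>
        let sj := PySem.List.pyGetD ss j []
        PySem.List.pySetD (ss ++ (pairs.drop 1).map (fun p => sj ++ p)) j (sj ++ pairs.headD []))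
      S =
    S.map (· ++ pairs.headD []) ++ S.flatMap (fun s => (pairs.drop 1).map (s ++ ·)) := by
  have h := markerFold pairs S [] []
  simpa using h

theorem expandRun (segs : List (List String × List (List String))) (tl : List String)
    (D : PySem.Dict Int (List (List String))) (base : Int) (S : List (List String))
    (hD : DictOK D base segs) (hsegs : ∀ p ∈ segs, "()" ∉ p.1) (htl : "()" ∉ tl) :
    (PySem.List.enumerate (render segs tl) base).foldl (aExpandStep D) S =
      (segs.foldl bFoldStep S).map (· ++ tl) := by
  induction segs generalizing base S with
  | nil =>
    rw [show render [] tl = tl from by simp [render]]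
    exact tokensRun D tl S base htl
  | cons seg segs ih =>
    obtain ⟨l, a⟩ := seg
    have hr : render ((l, a) :: segs) tl = (l ++ ["()"]) ++ render segs tl := by
      simp [render]
    rw [hr, PySem.List.enumerate_append, List.foldl_append,
      PySem.List.enumerate_append, List.foldl_append]
    have hl : "()" ∉ l := hsegs (l, a) (List.mem_cons_self) 
    rw [tokensRun D l S base hl]
    have hstep : (PySem.List.enumerate ["()"] (base + (l.length : Int))).foldl (aExpandStep D)
        (S.map (· ++ l)) = bFoldStep S (l, a) := by
      rw [PySem.List.enumerate_cons, PySem.List.enumerate_nil, List.foldl_cons, List.foldl_nil]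
      show aExpandStep D (S.map (· ++ l)) (base + (l.length : Int), "()") = _
      rw [aExpandStep]
      simp only [reduceIte]
      rw [show D.getD (base + (l.length : Int)) [] = a from hD.1]
      rw [markerFold0]
      rw [bFoldStep]
      simp [List.flatMap_map, Function.comp]
    rw [hstep,
      show base + ((l ++ ["()"]).length : Int) = base + (l.length : Int) + 1 from by
        simp; ring,
      List.foldl_cons]
    exact ih (base + (l.length : Int) + 1) (bFoldStep S (l, a)) hD.2
      (fun p hp => hsegs p (List.mem_cons_of_mem _ hp))

theorem parseB_mem (tokens : List String) :
    (∀ p ∈ (parseB tokens).1, ∀ x ∈ p.1, x ∈ tokens) ∧ (∀ x ∈ (parseB tokens).2, x ∈ tokens) := by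
  induction tokens using parseB.induct with
  | case1 tokens hnone =>
    rw [parseB_none _ hnone]
    exact ⟨fun p hp => absurd hp (List.not_mem_nil), fun x hx => hx⟩
  | case2 tokens i hsome rest hrest =>
    rw [parseB_unclosed _ _ hsome hrest]
    exact ⟨fun p hp => absurd hp (List.not_mem_nil), fun x hx => List.mem_of_mem_take hx⟩
  | case3 tokens i hsome rest j hjsome ih =>
    rw [parseB_closed _ _ _ hsome hjsome]
    have hsub : ∀ x : String, x ∈ ((tokens.drop (i+1)).drop (j+1)) → x ∈ tokens :=
      fun x hx => List.mem_of_mem_drop (List.mem_of_mem_drop hx)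
    constructor
    · intro p hp
      rcases List.mem_cons.mp hp with h | h
      · subst h; exact fun x hx => List.mem_of_mem_take hx
      · exact fun x hx => hsub x (ih.1 p h x hx)
    · exact fun x hx => hsub x (ih.2 x hx)

-- ===== VERDICT (by name: the statement is the Claim_ definition above) =====
theorem expand_parentheses_spec : Claim_equal_expand_parentheses := by
  intro sent _hdom hpre
  unfold Spec_expand_parentheses
  rw [expand_parentheses, expand_parentheses_alt]
  by_cases hg : "(" ∉ sent ∨ "|" ∉ sent
  · rw [if_pos hg, if_pos hg]
  · rw [if_neg hg, if_neg hg]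
    push Not at hg
    have hex : "" ∉ sent ∧ "()" ∉ sent ∧ ")|" ∉ sent := by
      unfold Pre_expand_parentheses at hpre
      push Not at hpre
      have := hpre hg.1 hg.2
      exact ⟨fun hm => by simp [hm] at this, fun hm => by simp [hm] at this,
        fun hm => by simp [hm] at this⟩
    obtain ⟨st, pg, cg, hparse⟩ := parse_main sent PySem.Dict.empty [] hex.1 hex.2.2
    simp only [List.nil_append, List.length_nil, Nat.cast_zero] at hparse
    show (PySem.List.enumerate
        (sent.foldl aParseStep (1, PySem.Dict.empty, [], [], [])).2.2.2.2 0).foldl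
      (aExpandStep (sent.foldl aParseStep (1, PySem.Dict.empty, [], [], [])).2.1) [[]] = _
    rw [hparse]
    have hmem := parseB_mem sent
    rw [expandRun (parseB sent).1 (parseB sent).2 _ 0 [[]]
      (DictOK_extendD _ _ _)
      (fun p hp hin => hex.2.1 (hmem.1 p hp _ hin))
      (fun hin => hex.2.1 (hmem.2 _ hin))]
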